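-- pv_equiv track=rewrite | github.com/1274866478-stack/data_agent | backend/src/app/core/auth.py | _is_public_path
-- ===== SOURCE A (Python) =====
-- def _is_public_path(path: str) -> bool:
--     """
--     检查路径是否为公共路径（不需要认证）
--     """
--     public_paths = [
--         "/",
--         "/health",
--         "/docs",
--         "/redoc",
--         "/openapi.json",
--         "/favicon.ico",
--     ]
--
--     # 检查是否匹配公共路径
--     for public_path in public_paths:
--         if path == public_path or path.startswith(public_path):
--             return True
--
--     return False
-- ===== SOURCE B (Python) =====
-- def _is_public_path(path: str) -> bool:
--     """Closed form: '/' is itself a public prefix and every other public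
--     prefix begins with '/', so the check collapses to one startswith."""
--     return path.startswith("/")
-- ===== Notes on version B (the rewrite author's own statement) =====
-- stated objective: simpler
-- what changed: Replaced the loop over six public prefixes with the closed-form observation that the root slash is itself one of the prefixes and every other prefix begins with it, so the whole check collapses to a single startswith test for the leading slash.
import Mathlib
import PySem

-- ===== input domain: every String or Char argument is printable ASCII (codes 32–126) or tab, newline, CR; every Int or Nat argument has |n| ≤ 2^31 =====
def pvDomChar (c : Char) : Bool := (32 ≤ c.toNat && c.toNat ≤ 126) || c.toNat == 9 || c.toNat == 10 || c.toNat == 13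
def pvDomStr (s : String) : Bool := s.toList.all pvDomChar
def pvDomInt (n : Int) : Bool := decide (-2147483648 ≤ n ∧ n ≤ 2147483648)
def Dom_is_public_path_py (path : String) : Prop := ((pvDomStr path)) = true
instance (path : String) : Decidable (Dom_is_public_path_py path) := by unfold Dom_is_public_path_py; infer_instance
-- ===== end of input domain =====

-- B collapses A's loop over six public prefixes to a single startswith("/") check (simpler).

-- ===== PORT A =====
-- the for-loop with early return, as structural recursion over the prefix list
def isPublicLoop (path : String) : List String → Bool
  | [] => false
  | p :: rest =>
    if path == p || PySem.Str.startswith path p then true else isPublicLoop path rest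

def is_public_path_py (path : String) : Bool :=
  isPublicLoop path ["/", "/health", "/docs", "/redoc", "/openapi.json", "/favicon.ico"]

-- ===== PORT B =====
def is_public_path_py_alt (path : String) : Bool :=
  PySem.Str.startswith path "/"

-- ===== PRECONDITION & SPEC =====
def Spec_is_public_path_py (path : String) (out : Bool) : Prop := out = is_public_path_py_alt path
instance (path : String) (out : Bool) : Decidable (Spec_is_public_path_py path out) := by unfold Spec_is_public_path_py; infer_instance

-- ===== CLAIM (what is proved, stated in full; the proofs are below) =====
def Claim_equal_is_public_path_py : Prop := ∀ (path : String), Dom_is_public_path_py path → Spec_is_public_path_py path (is_public_path_py path)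

-- ===== LEMMAS AND PROOFS =====

-- if path does not start with "/", no listed prefix p (each starting with '/') matches
lemma not_slash_no_match (path p : String) (hp : ('/' :: []) <+: p.toList)
    (h : PySem.Str.startswith path "/" = false) :
    (path == p || PySem.Str.startswith path p) = false := by
  have hnp : ¬ (('/' :: []) <+: path.toList) := by
    intro hx
    rw [PySem.Str.startswith_eq] at h
    have := (PySem.Chars.startswith_iff _ _).mpr (by simpa using hx)
    simp [this] at h
  simp only [Bool.or_eq_false_iff, beq_eq_false_iff_ne]
  refine ⟨?_, ?_⟩
  · rintro rfl; exact hnp hp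
  · by_contra hs
    simp only [Bool.not_eq_false] at hs
    rw [PySem.Str.startswith_eq] at hs
    exact hnp (hp.trans ((PySem.Chars.startswith_iff _ _).mp hs))

-- ===== VERDICT (by name: the statement is the Claim_ definition above) =====
theorem is_public_path_py_spec : Claim_equal_is_public_path_py := by
  intro path _
  unfold Spec_is_public_path_py is_public_path_py is_public_path_py_alt
  cases h : PySem.Str.startswith path "/" with
  | true => simp only [isPublicLoop, h, Bool.or_true, if_true]
  | false =>
    simp only [isPublicLoop,
      not_slash_no_match path "/" (by decide) h,
      not_slash_no_match path "/health" (by decide) h,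
      not_slash_no_match path "/docs" (by decide) h,
      not_slash_no_match path "/redoc" (by decide) h,
      not_slash_no_match path "/openapi.json" (by decide) h,
      not_slash_no_match path "/favicon.ico" (by decide) h]
    simp [← h]
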